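-- pv_equiv track=rewrite | github.com/mikaelfun/Leetcode | Company Test/Myota/msfs.py | create_frag_file
-- ===== SOURCE A (Python) =====
-- def create_frag_file(fullpath, fragNum):
--     # locate . in file name if there is one
--     path = fullpath+"_"+str(fragNum)
--     for index in range(len(fullpath) - 1, -1, -1):
--         if fullpath[index] == "\\":
--             break
--         elif fullpath[index] == ".":
--             path = fullpath[:index] + "_" + str(fragNum) + fullpath[index:]
--             break
--     # print (fragNum, fullpath, path)
--     return path
-- ===== SOURCE B (Python) =====
-- def create_frag_file(fullpath, fragNum):
--     # Recombine pieces via rpartition instead of scanning for an insertion index.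
--     head, sep, tail = fullpath.rpartition("\\")
--     name, dot, ext = tail.rpartition(".")
--     if dot:
--         return head + sep + name + "_" + str(fragNum) + dot + ext
--     return fullpath + "_" + str(fragNum)
-- ===== Notes on version B (the rewrite author's own statement) =====
-- stated objective: idiomatic
-- what changed: B replaces A's right-to-left per-character index scan and slice insertion with two rpartition calls (split off the basename at the last backslash, then split it at the last dot) and recombines the pieces.
import Mathlib
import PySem

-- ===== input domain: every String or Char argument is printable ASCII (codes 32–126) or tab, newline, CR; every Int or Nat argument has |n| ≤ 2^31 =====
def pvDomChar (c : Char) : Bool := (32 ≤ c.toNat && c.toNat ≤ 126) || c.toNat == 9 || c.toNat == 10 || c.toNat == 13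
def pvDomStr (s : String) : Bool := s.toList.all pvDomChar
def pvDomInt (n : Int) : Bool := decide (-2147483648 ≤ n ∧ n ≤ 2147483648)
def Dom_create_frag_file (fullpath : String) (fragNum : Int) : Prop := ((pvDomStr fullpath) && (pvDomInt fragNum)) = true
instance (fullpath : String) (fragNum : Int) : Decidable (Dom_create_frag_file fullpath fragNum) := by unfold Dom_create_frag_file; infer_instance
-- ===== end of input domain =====

-- B rebuilds the path from rpartition pieces instead of scanning for an insertion index (objective: idiomatic).

-- ===== PORT A =====
-- the for-loop over range(len(fullpath)-1, -1, -1) with break: recursion over the index list;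
-- fullpath[index] is always in range here, so 'none' of pyGet? (IndexError) is unreachable and returns path
def aLoop (cs : List Char) (frag : Int) (path : List Char) : List Int → List Char
  | [] => path
  | i :: rest =>
    match PySem.List.pyGet? cs i with
    | none => path
    | some c =>
      if c = '\\' then path
      else if c = '.' then
        PySem.List.slice cs none (some i) ++ '_' :: PySem.Int.toChars frag
          ++ PySem.List.slice cs (some i) none
      else aLoop cs frag path rest

def create_frag_file (fullpath : String) (fragNum : Int) : String :=
  -- path = fullpath + "_" + str(fragNum); then the loop, which returns path unless it re-assigns at a '.'
  String.ofList (aLoop fullpath.toList fragNum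
    (fullpath.toList ++ '_' :: PySem.Int.toChars fragNum)
    (PySem.List.pyRange ((fullpath.toList.length : Int) - 1) (-1) (-1)))

-- ===== PORT B =====
-- s.rpartition(c): scan the reversed chars for the first hit; none = separator absent ( ('','',s) in Python )
def rscan (c : Char) : List Char → List Char → Option (List Char × List Char)
  | [], _ => none
  | x :: xs, acc => if x = c then some (xs.reverse, acc) else rscan c xs (x :: acc)

def rpart (cs : List Char) (c : Char) : Option (List Char × List Char) :=
  rscan c cs.reverse []

def create_frag_file_alt (fullpath : String) (fragNum : Int) : String :=
  String.ofList <|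
    match rpart fullpath.toList '\\' with
    | some (h, t) =>
      match rpart t '.' with
      | some (name, ext) =>
          h ++ '\\' :: (name ++ '_' :: PySem.Int.toChars fragNum ++ '.' :: ext)
      | none => fullpath.toList ++ '_' :: PySem.Int.toChars fragNum
    | none =>
      match rpart fullpath.toList '.' with
      | some (name, ext) => name ++ '_' :: PySem.Int.toChars fragNum ++ '.' :: ext
      | none => fullpath.toList ++ '_' :: PySem.Int.toChars fragNum

-- ===== PRECONDITION & SPEC =====
def Spec_create_frag_file (fullpath : String) (fragNum : Int) (out : String) : Prop := out = create_frag_file_alt fullpath fragNum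
instance (fullpath : String) (fragNum : Int) (out : String) : Decidable (Spec_create_frag_file fullpath fragNum out) := by unfold Spec_create_frag_file; infer_instance

-- ===== CLAIM (what is proved, stated in full; the proofs are below) =====
def Claim_equal_create_frag_file : Prop := ∀ (fullpath : String) (fragNum : Int), Dom_create_frag_file fullpath fragNum → Spec_create_frag_file fullpath fragNum (create_frag_file fullpath fragNum)

-- ===== LEMMAS AND PROOFS =====

-- common characterisation: scan the reversed chars; stop at '\', or split at the first '.' seen
def findDotRev : List Char → List Char → Option (List Char × List Char)
  | [], _ => none
  | x :: xs, acc =>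
    if x = '\\' then none
    else if x = '.' then some (xs.reverse, acc)
    else findDotRev xs (x :: acc)

def specOut (cs : List Char) (frag : Int) : List Char :=
  match findDotRev cs.reverse [] with
  | none => cs ++ '_' :: PySem.Int.toChars frag
  | some (p, q) => p ++ '_' :: PySem.Int.toChars frag ++ '.' :: q

lemma aLoop_eq (frag : Int) : ∀ (rev acc cs : List Char), cs = rev.reverse ++ acc →
    aLoop cs frag (cs ++ '_' :: PySem.Int.toChars frag)
        (PySem.List.pyRange ((rev.length : Int) - 1) (-1) (-1)) =
      match findDotRev rev acc with
      | none => cs ++ '_' :: PySem.Int.toChars frag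
      | some (p, q) => p ++ '_' :: PySem.Int.toChars frag ++ '.' :: q := by
  intro rev
  induction rev with
  | nil =>
      intro acc cs h
      rw [PySem.List.pyRange_neg_one_eq_nil (by simp)]
      simp [aLoop, findDotRev]
  | cons x xs ih =>
      intro acc cs h
      have hlen : ((x :: xs).length : Int) - 1 = ((xs.length : Nat) : Int) := by simp
      rw [hlen, PySem.List.pyRange_neg_one_cons (by omega)]
      have hget : PySem.List.pyGet? cs ((xs.length : Nat) : Int) = some x := by
        have hcs : cs = xs.reverse ++ x :: acc := by simp [h]
        rw [hcs]
        have := PySem.List.pyGet?_append_length (pre := xs.reverse) (y := x) (ys := acc)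
        simp only [List.length_reverse] at this
        exact this
      by_cases hb : x = '\\'
      · subst hb; simp [aLoop, hget, findDotRev]
      · by_cases hd : x = '.'
        · subst hd
          simp only [aLoop, hget, findDotRev, if_neg hb]
          rw [PySem.List.slice_to_natCast, PySem.List.slice_from_natCast]
          have hcs : cs = xs.reverse ++ '.' :: acc := by simpa using h
          rw [hcs]
          have ht : (xs.reverse ++ '.' :: acc).take xs.length = xs.reverse := by
            rw [List.take_append_of_le_length (by simp)]; simp
          have hdp : (xs.reverse ++ '.' :: acc).drop xs.length = '.' :: acc := by
            rw [List.drop_append_of_le_length (by simp)]; simp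
          simp [ht, hdp]
        · simp only [aLoop, hget, if_neg hb, if_neg hd, findDotRev]
          exact ih (x :: acc) cs (by simpa using h)

lemma rscan_none (c : Char) : ∀ (xs acc : List Char), rscan c xs acc = none ↔ c ∉ xs := by
  intro xs
  induction xs with
  | nil => intro acc; simp [rscan]
  | cons x xs ih =>
      intro acc
      by_cases hx : x = c
      · subst hx; simp [rscan]
      · have hx' : ¬ c = x := fun hh => hx hh.symm
        simp [rscan, hx, ih, hx']

lemma rscan_some (c : Char) : ∀ (xs acc h t : List Char), rscan c xs acc = some (h, t) →
    ∃ u v, xs = u ++ c :: v ∧ c ∉ u ∧ h = v.reverse ∧ t = u.reverse ++ acc := by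
  intro xs
  induction xs with
  | nil => intro acc h t hs; simp [rscan] at hs
  | cons x xs ih =>
      intro acc h t hs
      by_cases hx : x = c
      · subst hx
        simp [rscan] at hs
        exact ⟨[], xs, by simp, by simp, hs.1.symm, by simp [hs.2.symm]⟩
      · rw [rscan, if_neg hx] at hs
        obtain ⟨u, v, h1, h2, h3, h4⟩ := ih (x :: acc) h t hs
        have hx' : ¬ c = x := fun hh => hx hh.symm
        exact ⟨x :: u, v, by simp [h1], by simp [h2, hx'], h3, by simp [h4]⟩

lemma findDotRev_no_bs : ∀ (xs acc : List Char), '\\' ∉ xs →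
    findDotRev xs acc = rscan '.' xs acc := by
  intro xs
  induction xs with
  | nil => intro acc _; simp [findDotRev, rscan]
  | cons x xs ih =>
      intro acc hnb
      have hx : x ≠ '\\' := fun h => hnb (h ▸ List.mem_cons_self)
      by_cases hd : x = '.'
      · subst hd; simp [findDotRev, rscan, hx]
      · rw [findDotRev, if_neg hx, if_neg hd, rscan, if_neg hd]
        exact ih (x :: acc) (fun h => hnb (List.mem_cons_of_mem _ h))

lemma findDotRev_bs : ∀ (u v acc : List Char), '\\' ∉ u →
    findDotRev (u ++ '\\' :: v) acc =
      (rscan '.' u acc).map (fun p => (v.reverse ++ '\\' :: p.1, p.2)) := by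
  intro u
  induction u with
  | nil => intro v acc _; simp [findDotRev, rscan]
  | cons x xs ih =>
      intro v acc hnb
      have hx : x ≠ '\\' := fun h => hnb (h ▸ List.mem_cons_self)
      by_cases hd : x = '.'
      · subst hd; simp [findDotRev, rscan, hx]
      · rw [List.cons_append, findDotRev, if_neg hx, if_neg hd, rscan, if_neg hd]
        exact ih v (x :: acc) (fun h => hnb (List.mem_cons_of_mem _ h))

lemma alt_eq_spec (fullpath : String) (frag : Int) :
    (create_frag_file_alt fullpath frag).toList = specOut fullpath.toList frag := by
  unfold create_frag_file_alt specOut rpart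
  rcases hbs : rscan '\\' fullpath.toList.reverse [] with _ | ⟨h, t⟩
  · have hnb : '\\' ∉ fullpath.toList.reverse := (rscan_none '\\' fullpath.toList.reverse []).mp hbs
    rw [findDotRev_no_bs fullpath.toList.reverse [] hnb]
    rcases hdot : rscan '.' fullpath.toList.reverse [] with _ | ⟨name, ext⟩ <;> simp
  · obtain ⟨u, v, h1, h2, h3, h4⟩ := rscan_some '\\' fullpath.toList.reverse [] h t hbs
    rw [h1, findDotRev_bs u v [] h2]
    have ht : t.reverse = u := by simp [h4]
    dsimp only
    rw [ht]
    rcases hdot : rscan '.' u [] with _ | ⟨name, ext⟩ <;> simp [h3]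

lemma a_eq_spec (fullpath : String) (frag : Int) :
    (create_frag_file fullpath frag).toList = specOut fullpath.toList frag := by
  unfold create_frag_file specOut
  have := aLoop_eq frag fullpath.toList.reverse [] fullpath.toList (by simp)
  simp only [List.length_reverse] at this
  rw [this]
  rcases findDotRev fullpath.toList.reverse [] with _ | ⟨p, q⟩ <;> simp

-- ===== VERDICT (by name: the statement is the Claim_ definition above) =====
theorem create_frag_file_spec : Claim_equal_create_frag_file := by
  intro fullpath fragNum _
  unfold Spec_create_frag_file
  have h1 := a_eq_spec fullpath fragNum
  have h2 := alt_eq_spec fullpath fragNum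
  exact String.toList_inj.mp (h1.trans h2.symm)
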